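-- pv_equiv track=rewrite | github.com/Shubham-Choudhury/GeeksforGeeks-Problems | 2025/08 August/13 Tywin's War Strategy/main.py | minSoldiers
-- ===== SOURCE A (Python) =====
-- def minSoldiers(arr, k):
--     n = len(arr)
--     need = (n + 1) // 2
--     costs = []
--
--     for num in arr:
--         if num % k == 0:
--             costs.append(0)
--         else:
--             costs.append(k - (num % k))
--
--     costs.sort()
--
--     total = sum(costs[:need])
--
--     return total
-- ===== SOURCE B (Python) =====
-- def minSoldiers(arr, k):
--     need = (len(arr) + 1) // 2
--     costs = [0 if x % k == 0 else k - x % k for x in arr]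
--     return _sum_smallest(costs, need)
--
--
-- def _sum_smallest(xs, m):
--     # Sum of the m smallest elements of xs via quickselect-style
--     # three-way partitioning (middle-element pivot): no full sort.
--     if not xs or m <= 0:
--         return 0
--     p = xs[len(xs) // 2]
--     lt = [x for x in xs if x < p]
--     eq = [x for x in xs if x == p]
--     gt = [x for x in xs if x > p]
--     if m <= len(lt):
--         return _sum_smallest(lt, m)
--     if m <= len(lt) + len(eq):
--         return sum(lt) + (m - len(lt)) * p
--     return sum(lt) + len(eq) * p + _sum_smallest(gt, m - len(lt) - len(eq))
-- ===== Notes on version B (the rewrite author's own statement) =====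
-- stated objective: alternative
-- what changed: B replaces A's full sort plus prefix sum with a quickselect-style three-way-partition recursion that sums the ceil(n/2) smallest costs without ever sorting.
-- outside the precondition, e.g. on minSoldiers([1, 2, 3], 0): A raises ZeroDivisionError, B raises ZeroDivisionError; on minSoldiers([], 0): A returns 0, B returns 0
import Mathlib
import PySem

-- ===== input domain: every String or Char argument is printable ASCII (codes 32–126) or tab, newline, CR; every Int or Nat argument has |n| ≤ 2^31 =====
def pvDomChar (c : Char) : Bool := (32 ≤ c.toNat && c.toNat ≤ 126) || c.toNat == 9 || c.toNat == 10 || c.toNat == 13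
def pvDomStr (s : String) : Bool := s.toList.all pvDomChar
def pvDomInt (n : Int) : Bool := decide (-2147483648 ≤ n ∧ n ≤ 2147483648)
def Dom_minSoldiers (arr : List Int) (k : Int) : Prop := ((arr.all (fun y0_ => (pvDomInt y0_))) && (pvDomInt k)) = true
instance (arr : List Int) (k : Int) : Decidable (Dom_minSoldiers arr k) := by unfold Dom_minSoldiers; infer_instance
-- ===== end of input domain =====

-- B sums the ceil(n/2) smallest costs by quickselect-style three-way partitioning instead of a full sort (alternative algorithm, not measured faster).
-- Pre_ excludes k = 0, on which A raises ZeroDivisionError whenever arr is nonempty (on [] both trivially return 0).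


-- ===== PORT A =====
def minSoldiers (arr : List Int) (k : Int) : Int :=
  let n : Int := arr.length
  let need : Int := PySem.Int.floordiv (n + 1) 2
  let costs : List Int := arr.foldl
    (fun costs num =>
      if PySem.Int.mod num k = 0 then costs ++ [0]
      else costs ++ [k - PySem.Int.mod num k]) []
  let costs := PySem.List.sorted costs (fun x => x) false
  let total := (PySem.List.slice costs none (some need)).sum
  total

-- ===== PORT B =====
-- fuel (≥ xs.length suffices) only makes the recursion of Source B's _sum_smallest structural
def pySumSmallestFuel : Nat → List Int → Int → Int
  | 0, _, _ => 0
  | fuel + 1, xs, m =>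
    if xs = [] ∨ m ≤ 0 then 0
    else
      let p := xs.getD (xs.length / 2) 0
      let lt := xs.filter (fun x => decide (x < p))
      let eq := xs.filter (fun x => decide (x = p))
      let gt := xs.filter (fun x => decide (p < x))
      if m ≤ (lt.length : Int) then pySumSmallestFuel fuel lt m
      else if m ≤ (lt.length : Int) + (eq.length : Int) then
        lt.sum + (m - (lt.length : Int)) * p
      else
        lt.sum + (eq.length : Int) * p +
          pySumSmallestFuel fuel gt (m - (lt.length : Int) - (eq.length : Int))

def pySumSmallest (xs : List Int) (m : Int) : Int :=
  pySumSmallestFuel xs.length xs m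

def minSoldiers_alt (arr : List Int) (k : Int) : Int :=
  let need : Int := PySem.Int.floordiv ((arr.length : Int) + 1) 2
  let costs := arr.map (fun x =>
    if PySem.Int.mod x k = 0 then 0 else k - PySem.Int.mod x k)
  pySumSmallest costs need

-- ===== PRECONDITION & SPEC =====
-- Pre_ excludes k = 0: Python's 'num % k' raises ZeroDivisionError for any element (on empty arr both return 0).
def Pre_minSoldiers (arr : List Int) (k : Int) : Prop := k ≠ 0
instance (arr : List Int) (k : Int) : Decidable (Pre_minSoldiers arr k) := by
  unfold Pre_minSoldiers; infer_instance

def pvWitness_minSoldiers : List Int × Int := ([1, 2, 3, 4, 5], 3)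

def Spec_minSoldiers (arr : List Int) (k : Int) (out : Int) : Prop := out = minSoldiers_alt arr k
instance (arr : List Int) (k : Int) (out : Int) : Decidable (Spec_minSoldiers arr k out) := by
  unfold Spec_minSoldiers; infer_instance

-- ===== CLAIM (what is proved, stated in full; the proofs are below) =====
def Claim_equal_minSoldiers : Prop := ∀ (arr : List Int) (k : Int),
  Dom_minSoldiers arr k → Pre_minSoldiers arr k → Spec_minSoldiers arr k (minSoldiers arr k)

-- ===== LEMMAS AND PROOFS =====

-- every element equal to p: the sum is length * p
theorem sum_of_all_eq {l : List Int} {p : Int} (h : ∀ x ∈ l, x = p) :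
    l.sum = (l.length : Int) * p := by
  induction l with
  | nil => simp
  | cons a t ih =>
    have ha := h a (by simp)
    simp only [List.sum_cons, List.length_cons, ha, ih (fun x hx => h x (by simp [hx]))]
    push_cast; ring

-- a strictly-smaller-than-everything pivot position: used to bound filter lengths
theorem filter_length_lt {xs : List Int} (p : Int → Bool)
    (hx : xs ≠ []) (hp : p (xs.getD (xs.length / 2) 0) = false) :
    (xs.filter p).length < xs.length := by
  have hlen : xs.length / 2 < xs.length :=
    Nat.div_lt_self (List.length_pos_iff.mpr hx) (by omega)
  refine List.length_filter_lt_length_iff_exists.mpr ?_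
  refine ⟨xs.getD (xs.length / 2) 0, ?_, by simpa [List.getD] using hp⟩
  rw [List.getD_eq_getElem xs 0 hlen]
  exact List.getElem_mem hlen

-- sorted xs splits at a pivot into sorted-below ++ equal ++ sorted-above
theorem sorted_split (xs : List Int) (p : Int) :
    PySem.List.sorted xs (fun x => x) false =
      PySem.List.sorted (xs.filter (fun x => decide (x < p))) (fun x => x) false ++
      (xs.filter (fun x => decide (x = p)) ++
       PySem.List.sorted (xs.filter (fun x => decide (p < x))) (fun x => x) false) := by
  apply PySem.List.sorted_id_eq_of_perm_of_pairwise
  · -- permutation with xs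
    have h1 : (xs.filter (fun x => decide (x < p)) ++
        xs.filter (fun x => !decide (x < p))).Perm xs :=
      List.filter_append_perm _ xs
    have h2 : ((xs.filter (fun x => !decide (x < p))).filter (fun x => decide (x = p)) ++
        (xs.filter (fun x => !decide (x < p))).filter (fun x => !decide (x = p))).Perm
        (xs.filter (fun x => !decide (x < p))) :=
      List.filter_append_perm _ _
    have e1 : (xs.filter (fun x => !decide (x < p))).filter (fun x => decide (x = p)) =
        xs.filter (fun x => decide (x = p)) := by
      rw [List.filter_filter]
      apply List.filter_congr
      intro x _
      by_cases hx : x = p <;> simp [hx]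
    have e2 : (xs.filter (fun x => !decide (x < p))).filter (fun x => !decide (x = p)) =
        xs.filter (fun x => decide (p < x)) := by
      rw [List.filter_filter]
      apply List.filter_congr
      intro x _
      by_cases hxp : x = p
      · simp [hxp]
      · by_cases hlt : x < p <;> simp [hxp, hlt] <;> omega
    rw [e1, e2] at h2
    refine List.Perm.trans (List.Perm.append (PySem.List.sorted_perm _ _ _)
      (List.Perm.append_left _ (PySem.List.sorted_perm _ _ _))) ?_
    exact List.Perm.trans (List.Perm.append_left _ h2) h1
  · -- pairwise ≤
    have hpwL : List.Pairwise (fun x1 x2 => x1 ≤ x2)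
        (PySem.List.sorted (xs.filter (fun x => decide (x < p))) (fun x => x) false) := by
      simpa using PySem.List.sorted_pairwise (xs.filter (fun x => decide (x < p))) (fun x => x)
    have hpwG : List.Pairwise (fun x1 x2 => x1 ≤ x2)
        (PySem.List.sorted (xs.filter (fun x => decide (p < x))) (fun x => x) false) := by
      simpa using PySem.List.sorted_pairwise (xs.filter (fun x => decide (p < x))) (fun x => x)
    rw [List.pairwise_append]
    refine ⟨hpwL, ?_, ?_⟩
    · rw [List.pairwise_append]
      refine ⟨?_, hpwG, ?_⟩
      · apply List.pairwise_of_forall_mem_list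
        intro a ha b hb
        have ha' : a = p := by simpa using (List.mem_filter.mp ha).2
        have hb' : b = p := by simpa using (List.mem_filter.mp hb).2
        omega
      · intro a ha b hb
        have ha' : a = p := by simpa using (List.mem_filter.mp ha).2
        have hb' : p < b := by
          simpa using (List.mem_filter.mp ((PySem.List.mem_sorted _ _ _ _).mp hb)).2
        omega
    · intro a ha b hb
      have ha' : a < p := by
        simpa using (List.mem_filter.mp ((PySem.List.mem_sorted _ _ _ _).mp ha)).2
      have hb' : p ≤ b := by
        rcases List.mem_append.mp hb with h | h
        · have : b = p := by simpa using (List.mem_filter.mp h).2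
          omega
        · have : p < b := by
            simpa using (List.mem_filter.mp ((PySem.List.mem_sorted _ _ _ _).mp h)).2
          omega
      omega

-- the three-way partition recursion computes the sum of the m smallest elements
theorem pySumSmallestFuel_eq : ∀ (fuel : Nat) (xs : List Int), xs.length ≤ fuel →
    ∀ (m : Int), pySumSmallestFuel fuel xs m =
      ((PySem.List.sorted xs (fun x => x) false).take m.toNat).sum := by
  intro fuel
  induction fuel with
  | zero =>
    intro xs h m
    have hxs : xs = [] := List.eq_nil_of_length_eq_zero (by omega)
    subst hxs
    simp [pySumSmallestFuel, PySem.List.sorted]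
  | succ fuel ih =>
    intro xs hlen m
    rw [pySumSmallestFuel]
    by_cases hbase : xs = [] ∨ m ≤ 0
    · rw [if_pos hbase]
      rcases hbase with h | h
      · subst h; simp [PySem.List.sorted]
      · have : m.toNat = 0 := by omega
        simp [this]
    · rw [if_neg hbase]
      dsimp only
      push_neg at hbase
      obtain ⟨hne, hm⟩ := hbase
      set p := xs.getD (xs.length / 2) 0 with hp
      set L := xs.filter (fun x => decide (x < p)) with hL
      set E := xs.filter (fun x => decide (x = p)) with hE
      set G := xs.filter (fun x => decide (p < x)) with hG
      have hLlt : L.length < xs.length := filter_length_lt _ hne (by simp [hp, List.getD])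
      have hGlt : G.length < xs.length := filter_length_lt _ hne (by simp [hp, List.getD])
      have hsplit := sorted_split xs p
      rw [hsplit]
      have hSL : (PySem.List.sorted L (fun x => x) false).length = L.length :=
        PySem.List.length_sorted _ _ _
      have hSLsum : (PySem.List.sorted L (fun x => x) false).sum = L.sum :=
        List.Perm.sum_eq (PySem.List.sorted_perm _ _ _)
      have hEall : ∀ x ∈ E, x = p := by
        intro x hx; simpa using (List.mem_filter.mp hx).2
      split_ifs with h1 h2
      · -- m ≤ |L| : only the sorted-L prefix is taken
        have htn : m.toNat ≤ (PySem.List.sorted L (fun x => x) false).length := by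
          rw [hSL]; omega
        rw [List.take_append_of_le_length htn]
        exact ih L (by omega) m
      · -- |L| < m ≤ |L| + |E| : all of L plus part of the equal block
        have hmn : m.toNat = (PySem.List.sorted L (fun x => x) false).length +
            (m.toNat - L.length) := by rw [hSL]; omega
        rw [hmn, List.take_length_add_append]
        have hje : m.toNat - L.length ≤ E.length := by omega
        rw [List.take_append_of_le_length hje, List.sum_append, hSLsum]
        have hEt : ∀ x ∈ E.take (m.toNat - L.length), x = p := by
          intro x hx; exact hEall x (List.mem_of_mem_take hx)
        rw [sum_of_all_eq hEt, List.length_take]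
        have : ((min (m.toNat - L.length) E.length : Nat) : Int) = m - (L.length : Int) := by
          omega
        rw [this]
      · -- m > |L| + |E| : all of L, all of E, recurse into G
        have hmn : m.toNat = (PySem.List.sorted L (fun x => x) false).length +
            (E.length + (m.toNat - L.length - E.length)) := by rw [hSL]; omega
        rw [hmn, List.take_length_add_append]
        have hEn : E.length + (m.toNat - L.length - E.length) =
            E.length + (m.toNat - L.length - E.length) := rfl
        rw [List.take_length_add_append, List.sum_append, List.sum_append, hSLsum,
          sum_of_all_eq hEall]
        have hrec := ih G (by omega) (m - (L.length : Int) - (E.length : Int))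
        have htn : (m - (L.length : Int) - (E.length : Int)).toNat =
            m.toNat - L.length - E.length := by omega
        rw [hrec, htn]
        ring

-- ===== VERDICT (by name: the statement is the Claim_ definition above) =====
theorem minSoldiers_spec : Claim_equal_minSoldiers := by
  intro arr k _hdom _hpre
  unfold Spec_minSoldiers minSoldiers minSoldiers_alt pySumSmallest
  simp only
  have hfun : (fun (costs : List Int) num =>
      if PySem.Int.mod num k = 0 then costs ++ [0]
      else costs ++ [k - PySem.Int.mod num k]) =
      (fun (costs : List Int) num =>
        costs ++ [if PySem.Int.mod num k = 0 then 0 else k - PySem.Int.mod num k]) := by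
    funext c x; split <;> rfl
  rw [hfun, PySem.List.foldl_append_singleton_eq_map]
  have hneed : (0 : Int) ≤ PySem.Int.floordiv ((arr.length : Int) + 1) 2 := by
    rw [PySem.Int.le_floordiv_iff_mul_le (by omega)]
    omega
  rw [PySem.List.slice_to _ hneed]
  rw [pySumSmallestFuel_eq (arr.map _).length _ (by simp) _]
  simp
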